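-- pv_equiv track=rewrite | github.com/KevinH45/USACO-Prep | 2021 BRONZE/aircown.py | findIncrease
-- ===== SOURCE A (Python) =====
-- def findIncrease(curr, des):
--     maxSub = -1
--     maxRange = ()
--     curRange = [0,0]
--     index = 0
--     for i,j in zip(curr,des):
--         if i<j:
--             curRange[1] += 1
--         else:
--             if maxSub < curRange[1]-curRange[0]:
--                 maxRange = curRange
--                 maxSub = curRange[1]-curRange[0]
--             curRange = [index+1, index+1]
--         index += 1
--     return maxRange,maxSub
-- ===== SOURCE B (Python) =====
-- def findIncrease(curr, des):
--     seps = [i for i, (c, d) in enumerate(zip(curr, des)) if c >= d]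
--     maxRange = ()
--     maxSub = -1
--     start = 0
--     for s in seps:
--         if maxSub < s - start:
--             maxRange = [start, s]
--             maxSub = s - start
--         start = s + 1
--     return maxRange, maxSub
-- ===== Notes on version B (the rewrite author's own statement) =====
-- stated objective: alternative
-- what changed: B first extracts the separator indices (positions where curr>=des) in one comprehension and then computes the best run from consecutive separator gaps, instead of A's single pass that maintains a mutable current-range list alongside the max.
import Mathlib
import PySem

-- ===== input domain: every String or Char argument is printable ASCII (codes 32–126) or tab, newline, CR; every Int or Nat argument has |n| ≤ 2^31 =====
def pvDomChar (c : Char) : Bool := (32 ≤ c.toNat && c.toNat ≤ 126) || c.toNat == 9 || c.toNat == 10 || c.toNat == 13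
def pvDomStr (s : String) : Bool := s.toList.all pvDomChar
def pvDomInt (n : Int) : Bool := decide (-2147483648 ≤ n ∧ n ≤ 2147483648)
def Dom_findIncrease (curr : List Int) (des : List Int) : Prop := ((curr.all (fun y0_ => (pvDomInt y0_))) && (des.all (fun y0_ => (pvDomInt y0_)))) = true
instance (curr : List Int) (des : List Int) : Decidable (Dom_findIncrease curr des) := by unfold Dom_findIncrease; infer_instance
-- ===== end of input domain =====

-- B replaces A's one-pass mutable current-range scan by a separator-index list plus a gap scan; objective: alternative decomposition, same value everywhere.

-- ===== PORT A =====
-- A's loop over zip(curr,des) with state (maxRange, maxSub, curRange = [lo,hi], index);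
-- the 2-element list curRange is carried as the pair (lo, hi).
def findIncreaseGoA : List (Int × Int) → List Int → Int → Int → Int → Int → List Int × Int
  | [], maxRange, maxSub, _, _, _ => (maxRange, maxSub)
  | (i, j) :: rest, maxRange, maxSub, lo, hi, index =>
    if i < j then
      findIncreaseGoA rest maxRange maxSub lo (hi + 1) (index + 1)
    else
      if maxSub < hi - lo then
        findIncreaseGoA rest [lo, hi] (hi - lo) (index + 1) (index + 1) (index + 1)
      else
        findIncreaseGoA rest maxRange maxSub (index + 1) (index + 1) (index + 1)

def findIncrease (curr : List Int) (des : List Int) : List Int × Int :=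
  findIncreaseGoA (curr.zip des) [] (-1) 0 0 0

-- ===== PORT B =====
-- B's second loop: running start over the separator indices.
def findIncreaseGoB : List Int → List Int → Int → Int → List Int × Int
  | [], maxRange, maxSub, _ => (maxRange, maxSub)
  | s :: rest, maxRange, maxSub, start =>
    if maxSub < s - start then
      findIncreaseGoB rest [start, s] (s - start) (s + 1)
    else
      findIncreaseGoB rest maxRange maxSub (s + 1)

def findIncrease_alt (curr : List Int) (des : List Int) : List Int × Int :=
  let seps := (PySem.List.enumerate (curr.zip des)).filterMap
      (fun p => if ¬ (p.2.1 < p.2.2) then some p.1 else none)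
  findIncreaseGoB seps [] (-1) 0

-- ===== PRECONDITION & SPEC =====
def Spec_findIncrease (curr : List Int) (des : List Int) (out : List Int × Int) : Prop := out = findIncrease_alt curr des
instance (curr : List Int) (des : List Int) (out : List Int × Int) : Decidable (Spec_findIncrease curr des out) := by unfold Spec_findIncrease; infer_instance

-- ===== CLAIM (what is proved, stated in full; the proofs are below) =====
def Claim_equal_findIncrease : Prop := ∀ (curr : List Int) (des : List Int), Dom_findIncrease curr des → Spec_findIncrease curr des (findIncrease curr des)

-- ===== LEMMAS AND PROOFS =====

-- Key invariant: with hi = index = s (the enumeration start) and lo = start,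
-- A's loop equals B's gap scan over the separator indices of the remaining pairs.
theorem findIncrease_go_eq (l : List (Int × Int)) :
    ∀ (mR : List Int) (mS st s : Int),
      findIncreaseGoA l mR mS st s s =
        findIncreaseGoB ((PySem.List.enumerate l s).filterMap
          (fun p => if ¬ (p.2.1 < p.2.2) then some p.1 else none)) mR mS st := by
  induction l with
  | nil => intro mR mS st s; simp [findIncreaseGoA, PySem.List.enumerate_nil, findIncreaseGoB]
  | cons hd tl ih =>
    intro mR mS st s
    obtain ⟨i, j⟩ := hd
    rw [PySem.List.enumerate_cons]
    by_cases h : i < j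
    · simpa [findIncreaseGoA, h] using ih mR mS st (s + 1)
    · simp only [findIncreaseGoA, if_neg h, List.filterMap_cons]
      simp only [h, not_false_eq_true, if_true, findIncreaseGoB]
      by_cases hc : mS < s - st
      · rw [if_pos hc, if_pos hc]; exact ih [st, s] (s - st) (s + 1) (s + 1)
      · rw [if_neg hc, if_neg hc]; exact ih mR mS (s + 1) (s + 1)

-- ===== VERDICT (by name: the statement is the Claim_ definition above) =====
theorem findIncrease_spec : Claim_equal_findIncrease := by
  intro curr des _
  unfold Spec_findIncrease findIncrease findIncrease_alt
  exact findIncrease_go_eq (curr.zip des) [] (-1) 0 0
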